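-- pv_equiv track=rewrite | github.com/arturbs/Programacao_1 | uni10/Agrupa_Matriculas/Agrupa_Matrículas.py | agrupa_por_periodo
-- ===== SOURCE A (Python) =====
-- def agrupa_por_periodo(alunos):
--     periodo = {}
--     aux = []
--     aux2 = []
--     cont = 0
--     aux.append(str(alunos[0][0:3]))
--
--     for n in range(len(alunos)):
--         for i in aux:
--             if alunos[n][0:3] == i:
--                 cont += 1
--         if cont == 0:
--             aux.append(str(alunos[n][0:3]))
--         cont = 0
--
--     for k in aux:
--         for j in range(len(alunos)):
--             if alunos[j][0:3] == k:
--                 cont+=1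
--         aux2.append(cont)
--         cont = 0
--
--     for l in range(len(aux)):
--         periodo.update({aux[l] : aux2[l]})
--     return periodo
-- ===== SOURCE B (Python) =====
-- def agrupa_por_periodo(alunos):
--     periodo = {}
--     for a in alunos:
--         p = a[0:3]
--         periodo[p] = periodo.get(p, 0) + 1
--     return periodo
-- ===== Notes on version B (the rewrite author's own statement) =====
-- stated objective: faster
-- what changed: Replaces A's three passes with nested rescans (build unique-prefix list by scanning it per element, then recount each prefix over the whole input, then assemble a dict) by a single pass that counts prefixes directly in a dict.
import Mathlib
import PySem

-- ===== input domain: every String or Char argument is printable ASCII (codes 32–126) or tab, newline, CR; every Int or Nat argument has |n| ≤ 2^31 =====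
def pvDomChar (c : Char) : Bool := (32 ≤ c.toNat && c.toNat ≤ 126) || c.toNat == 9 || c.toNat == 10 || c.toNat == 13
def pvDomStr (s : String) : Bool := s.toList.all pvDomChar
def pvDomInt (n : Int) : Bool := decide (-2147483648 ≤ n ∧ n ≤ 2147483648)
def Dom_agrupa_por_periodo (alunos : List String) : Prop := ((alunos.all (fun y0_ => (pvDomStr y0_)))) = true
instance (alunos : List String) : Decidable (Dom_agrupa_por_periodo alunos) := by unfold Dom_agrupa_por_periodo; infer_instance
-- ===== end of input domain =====

-- B replaces A's three passes with nested rescans by a single dict-counting pass;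
-- equal on every nonempty input (on the empty list A raises IndexError, B returns the empty dict).

-- ===== PORT A =====
def agrupa_por_periodo (alunos : List String) : List (String × Int) :=
  match alunos with
  | [] => []  -- Python raises IndexError on alunos[0] here; excluded by Pre_
  | a0 :: _ =>
    -- aux.append(str(alunos[0][0:3])); first loop builds aux, the list of unseen prefixes
    let aux1 : List String :=
      (PySem.List.pyRange 0 (PySem.List.len alunos)).foldl (fun aux n =>
        let cont := aux.foldl (fun c i =>
            if PySem.Str.slice (PySem.List.pyGetD alunos n "") (some 0) (some 3) = i then c + 1 else c) (0 : Int)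
        if cont = 0 then aux ++ [PySem.Str.slice (PySem.List.pyGetD alunos n "") (some 0) (some 3)] else aux)
        [PySem.Str.slice a0 (some 0) (some 3)]
    -- second loop: for each k in aux count its occurrences over alunos
    let aux2 : List Int :=
      aux1.foldl (fun acc k =>
        let cont := (PySem.List.pyRange 0 (PySem.List.len alunos)).foldl (fun c j =>
            if PySem.Str.slice (PySem.List.pyGetD alunos j "") (some 0) (some 3) = k then c + 1 else c) (0 : Int)
        acc ++ [cont]) []
    -- third loop: periodo.update({aux[l] : aux2[l]})
    ((PySem.List.pyRange 0 (PySem.List.len aux1)).foldl (fun d l =>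
        d.insert (PySem.List.pyGetD aux1 l "") (PySem.List.pyGetD aux2 l 0)) PySem.Dict.empty).items

-- ===== PORT B =====
def agrupa_por_periodo_alt (alunos : List String) : List (String × Int) :=
  (alunos.foldl (fun d a =>
      let p := PySem.Str.slice a (some 0) (some 3)
      d.insert p (d.getD p 0 + 1)) PySem.Dict.empty).items

-- ===== PRECONDITION & SPEC =====
-- Pre_ excludes only the empty list, on which A raises IndexError (it reads alunos[0] unconditionally).
def Pre_agrupa_por_periodo (alunos : List String) : Prop := alunos ≠ []
instance (alunos : List String) : Decidable (Pre_agrupa_por_periodo alunos) := by unfold Pre_agrupa_por_periodo; infer_instance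
def pvWitness_agrupa_por_periodo : List String := ["109ABC", "110X", "109Z"]

def Spec_agrupa_por_periodo (alunos : List String) (out : List (String × Int)) : Prop := out = agrupa_por_periodo_alt alunos
instance (alunos : List String) (out : List (String × Int)) : Decidable (Spec_agrupa_por_periodo alunos out) := by unfold Spec_agrupa_por_periodo; infer_instance

-- ===== CLAIM (what is proved, stated in full; the proofs are below) =====
def Claim_equal_agrupa_por_periodo : Prop := ∀ (alunos : List String), Dom_agrupa_por_periodo alunos → Pre_agrupa_por_periodo alunos → Spec_agrupa_por_periodo alunos (agrupa_por_periodo alunos)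

-- ===== LEMMAS AND PROOFS =====

-- the prefix operation a[0:3], used only in the proofs
def pvPref (s : String) : String := PySem.Str.slice s (some 0) (some 3)

-- A's inner scan-and-count-then-append step over aux IS Set.add of the prefix
lemma pv_step_eq_setAdd (aux : List String) (p : String) :
    (if (aux.foldl (fun c i => if p = i then c + 1 else c) (0 : Int)) = 0 then aux ++ [p] else aux)
      = PySem.Set.add aux p := by
  rw [PySem.List.foldl_ite_add_one (fun i => p = i) aux 0]
  by_cases h : p ∈ aux
  · have hpos : 0 < List.countP (fun x => decide (p = x)) aux :=
      List.countP_pos_iff.mpr ⟨p, h, by simp⟩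
    rw [if_neg (by omega)]
    simp [PySem.Set.add, PySem.Set.contains, h]
  · have hz : List.countP (fun x => decide (p = x)) aux = 0 :=
      List.countP_eq_zero.mpr (by intro a ha hpa; exact h ((of_decide_eq_true hpa) ▸ ha))
    rw [hz]
    simp [PySem.Set.add, PySem.Set.contains, h]

-- A's first loop builds exactly the set of prefixes in first-occurrence order
lemma pv_aux1_eq (a0 : String) (rest : List String) :
    (PySem.List.pyRange 0 (PySem.List.len (a0 :: rest))).foldl (fun aux n =>
        if (aux.foldl (fun c i =>
            if PySem.Str.slice (PySem.List.pyGetD (a0 :: rest) n "") (some 0) (some 3) = i then c + 1 else c) (0 : Int)) = 0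
        then aux ++ [PySem.Str.slice (PySem.List.pyGetD (a0 :: rest) n "") (some 0) (some 3)] else aux)
        [PySem.Str.slice a0 (some 0) (some 3)]
      = PySem.Set.ofList ((a0 :: rest).map pvPref) := by
  refine Eq.trans (show _ = List.foldl (fun aux x =>
        if (aux.foldl (fun c i => if PySem.Str.slice x (some 0) (some 3) = i then c + 1 else c) (0 : Int)) = 0
        then aux ++ [PySem.Str.slice x (some 0) (some 3)] else aux)
      [PySem.Str.slice a0 (some 0) (some 3)] (a0 :: rest) from
    PySem.List.foldl_pyRange_pyGetD (a0 :: rest) "" (fun aux x =>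
        if (aux.foldl (fun c i => if PySem.Str.slice x (some 0) (some 3) = i then c + 1 else c) (0 : Int)) = 0
        then aux ++ [PySem.Str.slice x (some 0) (some 3)] else aux)
      [PySem.Str.slice a0 (some 0) (some 3)] le_rfl) ?_
  show List.foldl (fun aux x =>
        if (aux.foldl (fun c i => if pvPref x = i then c + 1 else c) (0 : Int)) = 0
        then aux ++ [pvPref x] else aux) [pvPref a0] (a0 :: rest) = _
  rw [PySem.List.foldl_congr_mem _ _ (fun aux x => PySem.Set.add aux (pvPref x)) _
      (fun acc x _ => pv_step_eq_setAdd acc (pvPref x))]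
  rw [PySem.Set.ofList_eq_foldl, List.map_cons, List.foldl_cons, List.foldl_cons]
  have h0 : PySem.Set.add ([] : List String) (pvPref a0) = [pvPref a0] := by
    simp [PySem.Set.add, PySem.Set.contains]
  have h1 : PySem.Set.add [pvPref a0] (pvPref a0) = [pvPref a0] := by
    simp [PySem.Set.add, PySem.Set.contains]
  rw [h0, h1, ← List.foldl_map (f := pvPref) (g := PySem.Set.add)]

-- A's second-loop inner scan counts the prefixes equal to k
lemma pv_cont2_eq (alunos : List String) (k : String) :
    (PySem.List.pyRange 0 (PySem.List.len alunos)).foldl (fun c j =>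
        if PySem.Str.slice (PySem.List.pyGetD alunos j "") (some 0) (some 3) = k then c + 1 else c) (0 : Int)
      = (((alunos.map pvPref).count k : Nat) : Int) := by
  rw [PySem.List.foldl_pyRange_pyGetD alunos ""
      (fun c x => if PySem.Str.slice x (some 0) (some 3) = k then c + 1 else c) (0 : Int) le_rfl]
  simp only [Int.toNat_zero, List.drop_zero]
  rw [PySem.List.foldl_ite_add_one (fun x => PySem.Str.slice x (some 0) (some 3) = k) alunos 0]
  rw [List.count_eq_countP, List.countP_map, zero_add]
  norm_cast

-- the indexed pairing of a list with its map is the map of pairs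
lemma pv_range_pairs (xs : List String) (f : String → Int) :
    (List.range xs.length).map (fun i => (xs.getD i "", (xs.map f).getD i 0))
      = xs.map (fun k => (k, f k)) := by
  apply List.ext_getElem
  · simp
  · intro i h1 h2
    simp only [List.getElem_map, List.getElem_range]
    have hi : i < xs.length := by simpa using h2
    rw [List.getD_eq_getElem xs "" hi, List.getD_eq_getElem (xs.map f) 0 (by simpa using hi)]
    simp

-- A's third loop: inserting distinct fresh keys into an empty dict appends the pairs
lemma pv_loop3_eq (aux1 : List String) (aux2 : List Int) (f : String → Int)
    (hnd : aux1.Nodup) (h2 : aux2 = aux1.map f) :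
    ((PySem.List.pyRange 0 (PySem.List.len aux1)).foldl (fun d l =>
        d.insert (PySem.List.pyGetD aux1 l "") (PySem.List.pyGetD aux2 l 0)) PySem.Dict.empty).items
      = aux1.map (fun k => (k, f k)) := by
  have hlen : PySem.List.len aux1 = ((aux1.length : Nat) : Int) := rfl
  rw [hlen, PySem.List.pyRange_zero_natCast, List.foldl_map]
  have hmapk : (List.range aux1.length).map (fun i => PySem.List.pyGetD aux1 ((i : Nat) : Int) "") = aux1 := by
    apply List.ext_getElem
    · simp
    · intro i h1 h2'
      have hi : i < aux1.length := by simpa using h1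
      simp only [List.getElem_map, List.getElem_range]
      rw [PySem.List.pyGetD_natCast, List.getD_eq_getElem aux1 "" hi]
  rw [PySem.Dict.items_foldl_insert_fresh (List.range aux1.length)
      (fun i => PySem.List.pyGetD aux1 ((i : Nat) : Int) "") (fun i => PySem.List.pyGetD aux2 ((i : Nat) : Int) 0)
      PySem.Dict.empty (by intro a _; simp) (by rw [hmapk]; exact hnd)]
  rw [show (PySem.Dict.empty : PySem.Dict String Int).items = [] from rfl, List.nil_append]
  calc (List.range aux1.length).map (fun i => (PySem.List.pyGetD aux1 ((i : Nat) : Int) "", PySem.List.pyGetD aux2 ((i : Nat) : Int) 0))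
      = (List.range aux1.length).map (fun i => (aux1.getD i "", (aux1.map f).getD i 0)) := by
        apply List.map_congr_left; intro i _
        rw [PySem.List.pyGetD_natCast, PySem.List.pyGetD_natCast, h2]
    _ = aux1.map (fun k => (k, f k)) := pv_range_pairs aux1 f

-- B is the counter of the prefix list
lemma pv_alt_eq (alunos : List String) :
    agrupa_por_periodo_alt alunos
      = (PySem.Set.ofList (alunos.map pvPref)).map
          (fun k => (k, (((alunos.map pvPref).count k : Nat) : Int))) := by
  unfold agrupa_por_periodo_alt
  rw [show (fun (d : PySem.Dict String Int) (a : String) =>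
        let p := PySem.Str.slice a (some 0) (some 3)
        d.insert p (d.getD p 0 + 1))
      = (fun d a => d.insert (pvPref a) (d.getD (pvPref a) 0 + 1)) from rfl]
  rw [← List.foldl_map (f := pvPref) (g := fun (d : PySem.Dict String Int) x => d.insert x (d.getD x 0 + 1))]
  rw [PySem.Dict.foldl_insert_getD_add_one_eq_counter, PySem.Dict.items_counter]

-- ===== VERDICT (by name: the statement is the Claim_ definition above) =====
theorem agrupa_por_periodo_spec : Claim_equal_agrupa_por_periodo := by
  intro alunos _ hpre
  unfold Spec_agrupa_por_periodo
  match alunos with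
  | [] => exact absurd rfl hpre
  | a0 :: rest =>
    unfold agrupa_por_periodo
    simp only []
    rw [pv_aux1_eq a0 rest]
    rw [PySem.List.foldl_congr_mem _ _
        (fun acc k => acc ++ [((((a0 :: rest).map pvPref).count k : Nat) : Int)]) _
        (by intro acc k _; rw [pv_cont2_eq (a0 :: rest) k])]
    rw [PySem.List.foldl_append_singleton_eq_map (fun k => ((((a0 :: rest).map pvPref).count k : Nat) : Int))]
    rw [List.nil_append]
    rw [pv_loop3_eq _ _ (fun k => ((((a0 :: rest).map pvPref).count k : Nat) : Int))
        (PySem.Set.nodup_ofList _) rfl]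
    rw [pv_alt_eq]
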